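-- pv_equiv track=rewrite | github.com/abraia/abraia-multiple | abraia/training/dataset.py | load_task
-- ===== SOURCE A (Python) =====
-- def load_task(annotations):
--     classify, detect, segment = False, False, False
--     for annotation in annotations:
--         for object in annotation.get('objects', []):
--             if 'polygon' in object:
--                 segment = True
--             elif 'box' in object:
--                 detect = True
--             elif 'label' in object:
--                 classify = True
--     return 'segment' if segment else 'detect' if detect else 'classify' if classify else ''
-- ===== SOURCE B (Python) =====
-- def load_task(annotations):
--     objects = [o for a in annotations for o in a.get('objects', [])]
--     if any('polygon' in o for o in objects):
--         return 'segment'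
--     if any('box' in o for o in objects):
--         return 'detect'
--     if any('label' in o for o in objects):
--         return 'classify'
--     return ''
-- ===== Notes on version B (the rewrite author's own statement) =====
-- stated objective: simpler
-- what changed: Replaces the flag-accumulating nested loop (with its elif priority per object) by flattening all objects once and doing three priority-ordered short-circuit any() scans.
import Mathlib
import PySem

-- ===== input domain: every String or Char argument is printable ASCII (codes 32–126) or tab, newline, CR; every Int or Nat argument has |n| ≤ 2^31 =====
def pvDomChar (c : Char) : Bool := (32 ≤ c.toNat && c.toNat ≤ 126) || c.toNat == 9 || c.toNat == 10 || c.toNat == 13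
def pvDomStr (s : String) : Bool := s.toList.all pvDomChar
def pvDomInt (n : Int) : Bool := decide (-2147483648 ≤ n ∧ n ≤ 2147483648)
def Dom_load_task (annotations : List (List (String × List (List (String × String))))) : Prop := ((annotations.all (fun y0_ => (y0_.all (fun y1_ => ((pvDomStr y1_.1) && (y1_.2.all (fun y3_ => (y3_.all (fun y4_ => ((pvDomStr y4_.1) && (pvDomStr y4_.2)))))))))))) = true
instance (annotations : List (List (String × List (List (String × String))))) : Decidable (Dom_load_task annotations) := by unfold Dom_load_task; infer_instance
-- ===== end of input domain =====

-- B flattens all objects once and returns by three priority-ordered short-circuit scans,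
-- replacing A's flag-accumulating nested loop; return values agree on all inputs.

-- ===== PORT A =====
-- 'k' in object (a dict) → first-match key membership on the association list;
-- annotation.get('objects', []) → first-match lookup with default (exact for assoc lists with unique keys, the dict image).
def pvHasKey (object : List (String × String)) (k : String) : Bool :=
  object.any (fun p => p.1 == k)

def pvGetObjects (annotation : List (String × List (List (String × String)))) :
    List (List (String × String)) :=
  (List.lookup "objects" annotation).getD []

def load_task (annotations : List (List (String × List (List (String × String))))) : String :=
  let s := annotations.foldl (fun (st : Bool × Bool × Bool) annotation =>
    (pvGetObjects annotation).foldl (fun st object =>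
      if pvHasKey object "polygon" then (st.1, st.2.1, true)
      else if pvHasKey object "box" then (st.1, true, st.2.2)
      else if pvHasKey object "label" then (true, st.2.1, st.2.2)
      else st) st) (false, false, false)
  if s.2.2 then "segment" else if s.2.1 then "detect" else if s.1 then "classify" else ""

-- ===== PORT B =====
def load_task_alt (annotations : List (List (String × List (List (String × String))))) : String :=
  let objects := annotations.flatMap (fun a => pvGetObjects a)
  if objects.any (fun o => pvHasKey o "polygon") then "segment"
  else if objects.any (fun o => pvHasKey o "box") then "detect"
  else if objects.any (fun o => pvHasKey o "label") then "classify"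
  else ""

-- ===== PRECONDITION & SPEC =====
def Spec_load_task (annotations : List (List (String × List (List (String × String))))) (out : String) : Prop := out = load_task_alt annotations
instance (annotations : List (List (String × List (List (String × String))))) (out : String) : Decidable (Spec_load_task annotations out) := by unfold Spec_load_task; infer_instance

-- ===== CLAIM (what is proved, stated in full; the proofs are below) =====
def Claim_equal_load_task : Prop := ∀ (annotations : List (List (String × List (List (String × String))))), Dom_load_task annotations → Spec_load_task annotations (load_task annotations)

-- ===== LEMMAS AND PROOFS =====

-- the per-object flag update of A's loop
def pvStep (st : Bool × Bool × Bool) (object : List (String × String)) : Bool × Bool × Bool :=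
  if pvHasKey object "polygon" then (st.1, st.2.1, true)
  else if pvHasKey object "box" then (st.1, true, st.2.2)
  else if pvHasKey object "label" then (true, st.2.1, st.2.2)
  else st

-- the flags after folding a list of objects, in closed form
theorem pvStep_foldl (L : List (List (String × String))) (st : Bool × Bool × Bool) :
    L.foldl pvStep st =
      (st.1 || L.any (fun o => !pvHasKey o "polygon" && !pvHasKey o "box" && pvHasKey o "label"),
       st.2.1 || L.any (fun o => !pvHasKey o "polygon" && pvHasKey o "box"),
       st.2.2 || L.any (fun o => pvHasKey o "polygon")) := by
  induction L generalizing st with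
  | nil => simp
  | cons o L ih =>
    simp only [List.foldl_cons, List.any_cons, ih]
    unfold pvStep
    by_cases h1 : pvHasKey o "polygon" = true <;>
      by_cases h2 : pvHasKey o "box" = true <;>
      by_cases h3 : pvHasKey o "label" = true <;>
      simp [h1, h2, h3]

-- A's nested loop is the fold of pvStep over the flattened object list
theorem pvFold_flat (annotations : List (List (String × List (List (String × String)))))
    (st : Bool × Bool × Bool) :
    annotations.foldl (fun st a => (pvGetObjects a).foldl pvStep st) st =
      (annotations.flatMap (fun a => pvGetObjects a)).foldl pvStep st := by
  induction annotations generalizing st with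
  | nil => rfl
  | cons a t ih => simp [List.foldl_append, ih]

theorem load_task_eq (annotations : List (List (String × List (List (String × String))))) :
    load_task annotations = load_task_alt annotations := by
  unfold load_task load_task_alt
  show (if _ then _ else _) = _
  rw [show (fun (st : Bool × Bool × Bool) (object : List (String × String)) =>
      if pvHasKey object "polygon" then (st.1, st.2.1, true)
      else if pvHasKey object "box" then (st.1, true, st.2.2)
      else if pvHasKey object "label" then (true, st.2.1, st.2.2)
      else st) = pvStep from rfl]
  rw [pvFold_flat, pvStep_foldl]
  set L := annotations.flatMap (fun a => pvGetObjects a) with hL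
  simp only [Bool.false_or]
  by_cases hp : L.any (fun o => pvHasKey o "polygon") = true
  · simp [hp]
  · have hp' : ∀ o ∈ L, pvHasKey o "polygon" = false := by
      simpa [List.any_eq_true] using hp
    have e1 : L.any (fun o => !pvHasKey o "polygon" && pvHasKey o "box") =
        L.any (fun o => pvHasKey o "box") :=
      PySem.List.any_congr_mem (fun o ho => by simp [hp' o ho])
    simp only [hp, e1, Bool.not_eq_true] at *
    by_cases hb : L.any (fun o => pvHasKey o "box") = true
    · simp [hb]
    · have hb' : ∀ o ∈ L, pvHasKey o "box" = false := by
        simpa [List.any_eq_true] using hb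
      have e2 : L.any (fun o => !pvHasKey o "polygon" && !pvHasKey o "box" && pvHasKey o "label") =
          L.any (fun o => pvHasKey o "label") :=
        PySem.List.any_congr_mem (fun o ho => by simp [hp' o ho, hb' o ho])
      simp [hb, e2]

-- ===== VERDICT (by name: the statement is the Claim_ definition above) =====
theorem load_task_spec : Claim_equal_load_task := by
  intro annotations _
  exact load_task_eq annotations
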